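-- pv_equiv track=rewrite | github.com/iibrahimli/msc_thesis | arithmetic_lm/greedy_vs_beam.py | get_carry_str
-- ===== SOURCE A (Python) =====
-- def get_carry_str(a: str, b: str, reverse: bool = False) -> str:
--     """
--     given a and b (non-reversed), return the carry string
--     which contains:
--         '.' if there is no carry at that position,
--         'c' if there is current generated carry, but no carry from previous position
--         'p' if there is carry from previous position, but no current generated carry
--         'C' if there is both current generated carry and carry from previous position
--     """
--
--     carries = []
--     carry = 0
--
--     if reverse:
--         a = a[::-1]
--         b = b[::-1]
--
--     for aa, bb in zip(a, b):
--         aa = int(aa)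
--         bb = int(bb)
--         s = aa + bb + carry
--         if s >= 10:
--             if carry == 1:
--                 carries.append("C")
--             else:
--                 carries.append("c")
--             carry = 1
--         else:
--             if carry == 1:
--                 carries.append("p")
--             else:
--                 carries.append(".")
--             carry = 0
--
--     if carry == 1:
--         carries.append("p")
--
--     res = "".join(carries)
--
--     if reverse:
--         res = res[::-1]
--
--     return res
-- ===== SOURCE B (Python) =====
-- def get_carry_str(a: str, b: str, reverse: bool = False) -> str:
--     if reverse:
--         a = a[::-1]
--         b = b[::-1]
--     n = min(len(a), len(b))
--     # whole-number view: read the n zipped digit positions as integers x, y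
--     # with processing position i carrying weight 10**i (Horner from the top)
--     x = 0
--     for ch in reversed(a[:n]):
--         x = 10 * x + int(ch)
--     y = 0
--     for ch in reversed(b[:n]):
--         y = 10 * y + int(ch)
--
--     def carry(i):
--         # carry flowing into position i of x + y, by modular arithmetic
--         # on the whole numbers (carry-lookahead; no propagation)
--         p = 10 ** i
--         return (x % p + y % p) // p
--
--     res = "".join(".cpC"[2 * carry(i) + carry(i + 1)] for i in range(n))
--     if carry(n):
--         res += "p"
--     return res[::-1] if reverse else res
-- ===== Notes on version B (the rewrite author's own statement) =====
-- stated objective: alternative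
-- what changed: Replaces A's sequential ripple-carry loop (a carry bit threaded through a single pass) by carry-lookahead: B reads the zipped digit positions as whole integers x and y and computes each position's incoming/outgoing carry independently as (x % 10**i + y % 10**i) // 10**i, mapping the pair through the string table '.cpC'.
import Mathlib
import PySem

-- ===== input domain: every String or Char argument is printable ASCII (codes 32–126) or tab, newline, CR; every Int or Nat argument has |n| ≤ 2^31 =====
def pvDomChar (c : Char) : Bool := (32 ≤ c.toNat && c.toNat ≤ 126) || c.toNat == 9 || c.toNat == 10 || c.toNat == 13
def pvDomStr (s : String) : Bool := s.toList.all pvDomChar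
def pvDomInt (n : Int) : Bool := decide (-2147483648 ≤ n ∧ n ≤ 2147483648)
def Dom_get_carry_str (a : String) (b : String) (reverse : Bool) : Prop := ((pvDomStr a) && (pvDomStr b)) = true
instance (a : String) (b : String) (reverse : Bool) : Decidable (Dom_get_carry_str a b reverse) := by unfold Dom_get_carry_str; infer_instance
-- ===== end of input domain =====

-- B replaces A's sequential ripple-carry loop by carry-lookahead: it reads the zipped digit positions
-- as whole integers x, y and computes every position's carry independently as (x % 10^i + y % 10^i) // 10^i.
-- Pre_ excludes inputs where Python A raises ValueError (a non-digit character at a zipped position).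


-- value of int(c) for a digit character (exact on Pre_, where all zipped chars are digits)
def pvDigitVal (c : Char) : Int := (c.toNat : Int) - 48

-- ===== PORT A =====
-- the for-loop over zip(a,b) with accumulator `carry`; the trailing `if carry == 1: append 'p'` is the base case
def pvLoopA : List (Char × Char) → Int → List Char
  | [], carry => if carry == 1 then ['p'] else []
  | (aa, bb) :: rest, carry =>
    let s := pvDigitVal aa + pvDigitVal bb + carry
    if s ≥ 10 then
      (if carry == 1 then 'C' else 'c') :: pvLoopA rest 1
    else
      (if carry == 1 then 'p' else '.') :: pvLoopA rest 0

def get_carry_str (a : String) (b : String) (reverse : Bool) : String :=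
  let al := if reverse then a.toList.reverse else a.toList
  let bl := if reverse then b.toList.reverse else b.toList
  let res := pvLoopA (al.zip bl) 0
  String.ofList (if reverse then res.reverse else res)

-- ===== PORT B =====
-- carry(i) of Source B: p = 10**i; (x % p + y % p) // p   (i ≥ 0 always, so 10**i is 10^i.toNat)
def pvCarryAt (x y i : Int) : Int :=
  let p : Int := 10 ^ i.toNat
  PySem.Int.floordiv (PySem.Int.mod x p + PySem.Int.mod y p) p

def get_carry_str_alt (a : String) (b : String) (reverse : Bool) : String :=
  let al := if reverse then a.toList.reverse else a.toList
  let bl := if reverse then b.toList.reverse else b.toList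
  let n : Nat := min al.length bl.length
  -- 'x = 0; for ch in reversed(a[:n]): x = 10 * x + int(ch)'  (int(ch) as pvDigitVal: exact on Pre_)
  let x := ((PySem.List.slice al none (some (n : Int))).reverse).foldl (fun v c => 10 * v + pvDigitVal c) 0
  let y := ((PySem.List.slice bl none (some (n : Int))).reverse).foldl (fun v c => 10 * v + pvDigitVal c) 0
  -- '"".join(".cpC"[2*carry(i) + carry(i+1)] for i in range(n))'
  let res := (PySem.List.pyRange 0 (n : Int) 1).map
    (fun i => PySem.List.pyGetD ".cpC".toList (2 * pvCarryAt x y i + pvCarryAt x y (i + 1)) ' ')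
  -- 'if carry(n): res += "p"'  (int truthiness: nonzero)
  let res := if pvCarryAt x y (n : Int) ≠ 0 then res ++ ['p'] else res
  String.ofList (if reverse then res.reverse else res)

-- ===== PRECONDITION & SPEC =====
-- Pre_ excludes exactly the inputs where Python A raises ValueError: a non-digit character at a position reached by zip (after the optional reversal); Python B raises there too.
def Pre_get_carry_str (a : String) (b : String) (reverse : Bool) : Prop :=
  let al := if reverse then a.toList.reverse else a.toList
  let bl := if reverse then b.toList.reverse else b.toList
  ∀ p ∈ al.zip bl, p.1.isDigit ∧ p.2.isDigit
instance (a : String) (b : String) (reverse : Bool) : Decidable (Pre_get_carry_str a b reverse) := by unfold Pre_get_carry_str; infer_instance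

def pvWitness_get_carry_str : String × String × Bool := ("1784", "956", false)

def Spec_get_carry_str (a : String) (b : String) (reverse : Bool) (out : String) : Prop := out = get_carry_str_alt a b reverse
instance (a : String) (b : String) (reverse : Bool) (out : String) : Decidable (Spec_get_carry_str a b reverse out) := by unfold Spec_get_carry_str; infer_instance

-- ===== CLAIM (what is proved, stated in full; the proofs are below) =====
def Claim_equal_get_carry_str : Prop := ∀ (a : String) (b : String) (reverse : Bool), Dom_get_carry_str a b reverse → Pre_get_carry_str a b reverse → Spec_get_carry_str a b reverse (get_carry_str a b reverse)

-- ===== LEMMAS AND PROOFS =====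

-- LSB-first value of a digit list
def pvVal : List Int → Int
  | [] => 0
  | d :: t => d + 10 * pvVal t

-- the pure-arithmetic carry into position i (emod/ediv form of Source B's carry(i), plus an incoming carry c)
def pvCW (c X Y : Int) (i : Nat) : Int := (X % 10 ^ i + Y % 10 ^ i + c) / 10 ^ i

theorem pvHorner_eq_val (l : List Char) (f : Char → Int) :
    l.reverse.foldl (fun v c => 10 * v + f c) 0 = pvVal (l.map f) := by
  rw [List.foldl_reverse]
  induction l with
  | nil => rfl
  | cons c t ih => simp [List.foldr_cons, pvVal, ih]; ring

theorem pv_emod_split (d x q : Int) (hq : 0 < q) (hd : 0 ≤ d) (hd' : d < 10) :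
    (d + 10 * x) % (10 * q) = d + 10 * (x % q) := by
  conv_lhs => rw [show (10 : Int) * x = 10 * (x % q) + (10 * q) * (x / q) by
    rw [mul_assoc, ← Int.mul_add, Int.emod_add_mul_ediv]]
  rw [← add_assoc, Int.add_mul_emod_self_left]
  have h1 : 0 ≤ x % q := Int.emod_nonneg x (by omega)
  have h2 : x % q < q := Int.emod_lt_of_pos x hq
  exact Int.emod_eq_of_lt (by omega) (by nlinarith)

theorem pv_ediv_split (r m q : Int) (hq : 0 < q) (hr : 0 ≤ r) (hr' : r < 10) :
    (r + 10 * m) / (10 * q) = m / q := by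
  have hm : m = q * (m / q) + m % q := (Int.mul_ediv_add_emod m q).symm
  have h0 : 0 ≤ m % q := Int.emod_nonneg m (by omega)
  have h1 : m % q < q := Int.emod_lt_of_pos m hq
  calc (r + 10 * m) / (10 * q)
      = (r + 10 * (m % q) + (m / q) * (10 * q)) / (10 * q) := by congr 1; nlinarith [hm]
    _ = (r + 10 * (m % q)) / (10 * q) + m / q := by
        rw [Int.add_mul_ediv_right _ _ (by positivity : (10:Int) * q ≠ 0)]
    _ = m / q := by
        rw [Int.ediv_eq_zero_of_lt (by omega) (by nlinarith)]; ring

-- shift lemma: the carry into position i+1 of (da + 10 X', db + 10 Y') with incoming carry c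
-- equals the carry into position i of (X', Y') with incoming carry (da + db + c) / 10
theorem pvCW_shift (da db c X' Y' : Int) (hda : 0 ≤ da) (hda' : da < 10)
    (hdb : 0 ≤ db) (hdb' : db < 10) (i : Nat) :
    pvCW c (da + 10 * X') (db + 10 * Y') (i + 1)
      = pvCW ((da + db + c) / 10) X' Y' i := by
  have hq : (0 : Int) < 10 ^ i := by positivity
  unfold pvCW
  rw [pow_succ, mul_comm ((10:Int) ^ i) 10]
  rw [pv_emod_split da X' _ hq hda hda', pv_emod_split db Y' _ hq hdb hdb']
  have hrc : da + db + c = (da + db + c) % 10 + 10 * ((da + db + c) / 10) := by omega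
  have hr0 : 0 ≤ (da + db + c) % 10 := Int.emod_nonneg _ (by omega)
  have hr1 : (da + db + c) % 10 < 10 := Int.emod_lt_of_pos _ (by omega)
  calc (da + 10 * (X' % 10 ^ i) + (db + 10 * (Y' % 10 ^ i)) + c) / (10 * 10 ^ i)
      = ((da + db + c) % 10 + 10 * (X' % 10 ^ i + Y' % 10 ^ i + (da + db + c) / 10)) / (10 * 10 ^ i) := by
        congr 1; omega
    _ = (X' % 10 ^ i + Y' % 10 ^ i + (da + db + c) / 10) / 10 ^ i :=
        pv_ediv_split _ _ _ hq hr0 hr1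

theorem pvDigitVal_bounds (c : Char) (h : c.isDigit) : 0 ≤ pvDigitVal c ∧ pvDigitVal c < 10 := by
  simp [Char.isDigit] at h
  obtain ⟨h1, h2⟩ := h
  have a1 : (48:UInt32).toNat ≤ c.val.toNat := UInt32.le_iff_toNat_le.mp h1
  have a2 : c.val.toNat ≤ (57:UInt32).toNat := UInt32.le_iff_toNat_le.mp h2
  have e0 : c.toNat = c.val.toNat := rfl
  have e1 : (48:UInt32).toNat = 48 := rfl
  have e2 : (57:UInt32).toNat = 57 := rfl
  unfold pvDigitVal
  omega

-- MAIN LEMMA: A's fused ripple-carry loop equals the carry-lookahead labelling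
theorem pvLoopA_eq_arith (ps : List (Char × Char)) : ∀ c : Int, c = 0 ∨ c = 1 →
    (∀ p ∈ ps, p.1.isDigit ∧ p.2.isDigit) →
    pvLoopA ps c =
      (List.range ps.length).map (fun i =>
        PySem.List.pyGetD ".cpC".toList
          (2 * pvCW c (pvVal (ps.map (fun p => pvDigitVal p.1))) (pvVal (ps.map (fun p => pvDigitVal p.2))) i
             + pvCW c (pvVal (ps.map (fun p => pvDigitVal p.1))) (pvVal (ps.map (fun p => pvDigitVal p.2))) (i + 1)) ' ')
      ++ (if pvCW c (pvVal (ps.map (fun p => pvDigitVal p.1))) (pvVal (ps.map (fun p => pvDigitVal p.2))) ps.length ≠ 0 then ['p'] else []) := by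
  induction ps with
  | nil =>
    intro c hc _
    rcases hc with rfl | rfl <;> simp [pvLoopA, pvCW, pvVal]
  | cons p rest ih =>
    intro c hc hd
    obtain ⟨ca, cb⟩ := p
    have hda := pvDigitVal_bounds ca (hd (ca, cb) List.mem_cons_self).1
    have hdb := pvDigitVal_bounds cb (hd (ca, cb) List.mem_cons_self).2
    have hmapX : pvVal (((ca, cb) :: rest).map (fun p => pvDigitVal p.1))
        = pvDigitVal ca + 10 * pvVal (rest.map (fun p => pvDigitVal p.1)) := rfl
    have hmapY : pvVal (((ca, cb) :: rest).map (fun p => pvDigitVal p.2))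
        = pvDigitVal cb + 10 * pvVal (rest.map (fun p => pvDigitVal p.2)) := rfl
    have hshift : ∀ i : Nat,
        pvCW c (pvDigitVal ca + 10 * pvVal (rest.map (fun p => pvDigitVal p.1)))
            (pvDigitVal cb + 10 * pvVal (rest.map (fun p => pvDigitVal p.2))) (i + 1)
          = pvCW ((pvDigitVal ca + pvDigitVal cb + c) / 10)
              (pvVal (rest.map (fun p => pvDigitVal p.1)))
              (pvVal (rest.map (fun p => pvDigitVal p.2))) i :=
      fun i => pvCW_shift _ _ c _ _ hda.1 hda.2 hdb.1 hdb.2 i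
    have hzero : pvCW c (pvDigitVal ca + 10 * pvVal (rest.map (fun p => pvDigitVal p.1)))
        (pvDigitVal cb + 10 * pvVal (rest.map (fun p => pvDigitVal p.2))) 0 = c := by
      simp [pvCW]
    have hdrest : ∀ p ∈ rest, p.1.isDigit ∧ p.2.isDigit :=
      fun p hp => hd p (List.mem_cons_of_mem _ hp)
    rw [hmapX, hmapY, List.length_cons, List.range_succ_eq_map, List.map_cons, List.map_map,
        List.cons_append]
    by_cases h10 : (10 : Int) ≤ pvDigitVal ca + pvDigitVal cb + c
    · have hdiv : (pvDigitVal ca + pvDigitVal cb + c) / 10 = 1 := by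
        rcases hc with rfl | rfl <;> omega
      simp only [hdiv] at hshift
      have htail := ih 1 (Or.inr rfl) hdrest
      simp only [pvLoopA, ge_iff_le]
      rw [if_pos h10, htail]
      congr 1
      · have h1 := hshift 0
        norm_num at h1
        have hz2 : pvCW 1 (pvVal (rest.map (fun p => pvDigitVal p.1)))
            (pvVal (rest.map (fun p => pvDigitVal p.2))) 0 = 1 := by simp [pvCW]
        rw [hzero, h1, hz2]
        rcases hc with rfl | rfl <;> decide
      · congr 1
        · apply List.map_congr_left
          intro i _
          simp only [Function.comp_apply, Nat.succ_eq_add_one]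
          rw [hshift i, hshift (i + 1)]
        · rw [hshift rest.length]
    · have hdiv : (pvDigitVal ca + pvDigitVal cb + c) / 10 = 0 := by
        rcases hc with rfl | rfl <;> omega
      simp only [hdiv] at hshift
      have htail := ih 0 (Or.inl rfl) hdrest
      simp only [pvLoopA, ge_iff_le]
      rw [if_neg h10, htail]
      congr 1
      · have h1 := hshift 0
        norm_num at h1
        have hz2 : pvCW 0 (pvVal (rest.map (fun p => pvDigitVal p.1)))
            (pvVal (rest.map (fun p => pvDigitVal p.2))) 0 = 0 := by simp [pvCW]
        rw [hzero, h1, hz2]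
        rcases hc with rfl | rfl <;> decide
      · congr 1
        · apply List.map_congr_left
          intro i _
          simp only [Function.comp_apply, Nat.succ_eq_add_one]
          rw [hshift i, hshift (i + 1)]
        · rw [hshift rest.length]

-- zipping keeps exactly the first min-length prefix of each list
theorem pvZipFstTake (al bl : List Char) :
    (al.zip bl).map Prod.fst = al.take (min al.length bl.length) := by
  induction al generalizing bl with
  | nil => simp
  | cons x t ih =>
    cases bl with
    | nil => simp
    | cons y u => simp [ih, Nat.succ_min_succ]

theorem pvZipSndTake (al bl : List Char) :
    (al.zip bl).map Prod.snd = bl.take (min al.length bl.length) := by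
  induction al generalizing bl with
  | nil => simp
  | cons x t ih =>
    cases bl with
    | nil => simp
    | cons y u => simp [ih, Nat.succ_min_succ]

-- Source B's carry(i) at a Nat index is the pure emod/ediv carry with no incoming carry
theorem pvCarryAt_natCast (x y : Int) (i : Nat) : pvCarryAt x y (i : Int) = pvCW 0 x y i := by
  have hp : (0:Int) < 10 ^ i := by positivity
  simp only [pvCarryAt, pvCW, Int.toNat_natCast, PySem.Int.mod_eq_emod_of_pos hp,
    PySem.Int.floordiv_eq_ediv_of_pos hp, add_zero]

-- the two ports agree on the (possibly reversed) character lists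
theorem pvCore (al bl : List Char) (h : ∀ p ∈ al.zip bl, p.1.isDigit ∧ p.2.isDigit) :
    pvLoopA (al.zip bl) 0 =
      (let n : Nat := min al.length bl.length
       let x := ((PySem.List.slice al none (some (n : Int))).reverse).foldl
         (fun v c => 10 * v + pvDigitVal c) 0
       let y := ((PySem.List.slice bl none (some (n : Int))).reverse).foldl
         (fun v c => 10 * v + pvDigitVal c) 0
       let res := (PySem.List.pyRange 0 (n : Int) 1).map
         (fun i => PySem.List.pyGetD ".cpC".toList (2 * pvCarryAt x y i + pvCarryAt x y (i + 1)) ' ')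
       if pvCarryAt x y (n : Int) ≠ 0 then res ++ ['p'] else res) := by
  simp only [PySem.List.slice_to_natCast]
  rw [pvHorner_eq_val (al.take (min al.length bl.length)) pvDigitVal,
      pvHorner_eq_val (bl.take (min al.length bl.length)) pvDigitVal]
  rw [← pvZipFstTake al bl, ← pvZipSndTake al bl, List.map_map, List.map_map]
  rw [pvLoopA_eq_arith (al.zip bl) 0 (Or.inl rfl) h, List.length_zip]
  rw [PySem.List.pyRange_zero_nat, List.map_map]
  have hite : pvCarryAt (pvVal (List.map (pvDigitVal ∘ Prod.fst) (al.zip bl)))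
      (pvVal (List.map (pvDigitVal ∘ Prod.snd) (al.zip bl))) ((min al.length bl.length : Nat) : Int)
      = pvCW 0 (pvVal (List.map (pvDigitVal ∘ Prod.fst) (al.zip bl)))
          (pvVal (List.map (pvDigitVal ∘ Prod.snd) (al.zip bl))) (min al.length bl.length) :=
    pvCarryAt_natCast _ _ _
  rw [hite]
  have hmaps : (List.map (fun p => pvDigitVal p.1) (al.zip bl)) = (List.map (pvDigitVal ∘ Prod.fst) (al.zip bl)) := rfl
  have hmaps2 : (List.map (fun p => pvDigitVal p.2) (al.zip bl)) = (List.map (pvDigitVal ∘ Prod.snd) (al.zip bl)) := rfl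
  rw [hmaps, hmaps2]
  set X := pvVal (List.map (pvDigitVal ∘ Prod.fst) (al.zip bl)) with hXdef
  set Y := pvVal (List.map (pvDigitVal ∘ Prod.snd) (al.zip bl)) with hYdef
  set m := min al.length bl.length with hmdef
  have hmapeq : ∀ i ∈ List.range m,
      ((fun i => PySem.List.pyGetD ".cpC".toList (2 * pvCarryAt X Y i + pvCarryAt X Y (i + 1)) ' ')
          ∘ (fun k : Nat => (k : Int))) i
        = (fun i : Nat => PySem.List.pyGetD ".cpC".toList (2 * pvCW 0 X Y i + pvCW 0 X Y (i + 1)) ' ') i := by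
    intro i _
    simp only [Function.comp_apply]
    rw [pvCarryAt_natCast]
    have h1 : ((i : Int) + 1) = ((i + 1 : Nat) : Int) := by push_cast; ring
    rw [h1, pvCarryAt_natCast]
  rw [List.map_congr_left hmapeq]
  split_ifs <;> simp

-- ===== VERDICT (by name: the statement is the Claim_ definition above) =====
theorem get_carry_str_spec : Claim_equal_get_carry_str := by
  intro a b reverse _ hpre
  unfold Pre_get_carry_str at hpre
  unfold Spec_get_carry_str get_carry_str get_carry_str_alt
  cases reverse <;> simp only [Bool.false_eq_true, if_false, if_true] at hpre ⊢ <;>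
    rw [pvCore _ _ hpre]
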